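-- pv_equiv track=rewrite | github.com/Aimmecat/SM2 | python/Utils/TransformData.py | Beauty_Show_Hex
-- ===== SOURCE A (Python) =====
-- import math
--
-- def Beauty_Show_Hex(m: str):
--     ret = ''
--     l = math.ceil(len(m) / 8)
--     m = '0' * (8 * l - len(m)) + m
--     cnt = 0
--     for single_hex in m:
--         ret += single_hex
--         cnt += 1
--         if cnt == 8:
--             ret += ' '
--             cnt = 0
--     return ret
-- ===== SOURCE B (Python) =====
-- def Beauty_Show_Hex(m: str):
--     pad = '0' * (-len(m) % 8) + m
--     return ''.join(pad[i:i + 8] + ' ' for i in range(0, len(pad), 8))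
-- ===== Notes on version B (the rewrite author's own statement) =====
-- stated objective: simpler
-- what changed: B computes the pad length with -len(m) % 8 and joins 8-character slices (each followed by a space) instead of A's per-character loop with a running counter and ceil-based padding.
import Mathlib
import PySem

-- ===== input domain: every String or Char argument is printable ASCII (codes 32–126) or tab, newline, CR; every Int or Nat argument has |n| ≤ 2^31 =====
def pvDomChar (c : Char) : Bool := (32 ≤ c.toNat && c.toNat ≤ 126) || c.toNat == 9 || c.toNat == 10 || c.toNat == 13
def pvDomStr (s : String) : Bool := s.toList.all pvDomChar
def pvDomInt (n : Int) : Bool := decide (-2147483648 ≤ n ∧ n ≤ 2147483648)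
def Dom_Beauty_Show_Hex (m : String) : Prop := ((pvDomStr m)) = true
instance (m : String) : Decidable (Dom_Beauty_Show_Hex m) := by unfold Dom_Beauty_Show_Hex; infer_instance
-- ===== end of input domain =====

-- B pads with '0' * (-len(m) % 8) and joins 8-character slices, each followed by one space,
-- replacing A's per-character loop with a running counter (objective: simpler).

-- ===== PORT A =====
-- the for-loop of A: state is (ret, cnt)
def pvALoop : List Char → List Char → Int → List Char
  | [], ret, _ => ret
  | c :: rest, ret, cnt =>
    -- ret += single_hex; cnt += 1; if cnt == 8: ret += ' '; cnt = 0
    if cnt + 1 == 8 then pvALoop rest (ret ++ [c] ++ [' ']) 0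
    else pvALoop rest (ret ++ [c]) (cnt + 1)

def Beauty_Show_Hex (m : String) : String :=
  let n : Int := m.toList.length
  -- math.ceil(len(m)/8): exact as -((-n) // 8) for these integer lengths
  let l : Int := -(PySem.Int.floordiv (-n) 8)
  let padded : List Char := List.replicate (8 * l - n).toNat '0' ++ m.toList
  String.ofList (pvALoop padded [] 0)

-- ===== PORT B =====
def Beauty_Show_Hex_alt (m : String) : String :=
  let pad : List Char :=
    List.replicate (PySem.Int.mod (-(m.toList.length : Int)) 8).toNat '0' ++ m.toList
  -- ''.join(pad[i:i+8] + ' ' for i in range(0, len(pad), 8))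
  String.ofList (((PySem.List.pyRange 0 (pad.length : Int) 8).map
      (fun i => PySem.List.slice pad (some i) (some (i + 8)) ++ [' '])).flatten)

-- ===== PRECONDITION & SPEC =====
def Spec_Beauty_Show_Hex (m : String) (out : String) : Prop := out = Beauty_Show_Hex_alt m
instance (m : String) (out : String) : Decidable (Spec_Beauty_Show_Hex m out) := by unfold Spec_Beauty_Show_Hex; infer_instance

-- ===== CLAIM (what is proved, stated in full; the proofs are below) =====
def Claim_equal_Beauty_Show_Hex : Prop := ∀ (m : String), Dom_Beauty_Show_Hex m → Spec_Beauty_Show_Hex m (Beauty_Show_Hex m)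

-- ===== LEMMAS AND PROOFS =====

-- the common normal form: k groups of 8 characters, each followed by a space
def pvChunks : Nat → List Char → List Char
  | 0, _ => []
  | k+1, l => l.take 8 ++ ' ' :: pvChunks k (l.drop 8)

lemma pvALoop_chunks (k : Nat) : ∀ (l : List Char) (acc : List Char),
    l.length = 8 * k → pvALoop l acc 0 = acc ++ pvChunks k l := by
  induction k with
  | zero =>
    intro l acc h
    have : l = [] := List.length_eq_zero_iff.mp (by omega)
    simp [this, pvALoop, pvChunks]
  | succ k ih =>
    intro l acc h
    rcases l with _ | ⟨a, l⟩; · simp at h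
    rcases l with _ | ⟨b, l⟩; · simp at h; omega
    rcases l with _ | ⟨c, l⟩; · simp at h; omega
    rcases l with _ | ⟨d, l⟩; · simp at h; omega
    rcases l with _ | ⟨e, l⟩; · simp at h; omega
    rcases l with _ | ⟨f, l⟩; · simp at h; omega
    rcases l with _ | ⟨g, l⟩; · simp at h; omega
    rcases l with _ | ⟨h8, l⟩; · simp at h; omega
    have hl : l.length = 8 * k := by simp at h; omega
    simp only [pvALoop, pvChunks]
    norm_num
    rw [ih l _ hl]
    simp

lemma pvSlice_take (pad : List Char) (i : Nat) :
    PySem.List.slice pad (some ((8 : Int) * i)) (some ((8 : Int) * i + 8)) =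
      (pad.drop (8 * i)).take 8 := by
  have := PySem.List.slice_natCast_add pad (8 * i) 8
  push_cast at this
  exact this

lemma pvFlat_chunks (k : Nat) : ∀ (pad : List Char),
    (((List.range k).map (fun i : Nat => ((8 : Int) * (i : Int)))).map
        (fun i => PySem.List.slice pad (some i) (some (i + 8)) ++ [' '])).flatten
      = pvChunks k pad := by
  induction k with
  | zero => intro pad; simp [pvChunks]
  | succ k ih =>
    intro pad
    rw [List.range_succ_eq_map]
    simp only [List.map_cons, List.map_map, List.flatten_cons]
    have h0 : PySem.List.slice pad (some ((8 : Int) * (0 : Nat))) (some ((8 : Int) * (0 : Nat) + 8)) ++ [' ']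
        = pad.take 8 ++ [' '] := by
      rw [pvSlice_take]; simp
    have hrest :
        ((List.range k).map ((fun i => PySem.List.slice pad (some i) (some (i + 8)) ++ [' ']) ∘
            (fun i : Nat => ((8 : Int) * i)) ∘ Nat.succ))
          = (((List.range k).map (fun i : Nat => ((8 : Int) * (i : Int)))).map
              (fun i => PySem.List.slice (pad.drop 8) (some i) (some (i + 8)) ++ [' '])) := by
      rw [List.map_map]
      apply List.map_congr_left
      intro i _
      simp only [Function.comp_apply]
      have h1 := pvSlice_take pad (i + 1)
      have h2 := pvSlice_take (pad.drop 8) i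
      have e1 : ((8 : Int) * (↑(i + 1) : Int)) = (8 : Int) * i + 8 := by push_cast; ring
      rw [e1] at h1
      have e2 : PySem.List.slice pad (some ((8:Int) * (i:Int) + 8)) (some ((8:Int) * (i:Int) + 8 + 8))
          = PySem.List.slice (pad.drop 8) (some ((8:Int) * (i:Int))) (some ((8:Int) * (i:Int) + 8)) := by
        rw [h1, h2, List.drop_drop, show 8 * (i + 1) = 8 + 8 * i from by ring]
      simpa using congrArg (· ++ [' ']) e2
    rw [hrest, ih (pad.drop 8)]
    simp only [pvChunks]
    rw [h0]
    simp

lemma pvRange_eight (k : Nat) :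
    PySem.List.pyRange 0 ((8 : Int) * k) 8 = (List.range k).map (fun i : Nat => ((8 : Int) * (i : Int))) := by
  rw [PySem.List.pyRange_of_pos 0 ((8 : Int) * k) (by norm_num)]
  rcases Nat.eq_zero_or_pos k with rfl | hk
  · simp
  · have hif : (0 : Int) < 8 * k := by positivity
    rw [if_pos hif]
    have : (((8 : Int) * k - 0 + 8 - 1) / 8).toNat = k := by omega
    rw [this]
    apply List.map_congr_left
    intro i _
    ring

-- ===== VERDICT (by name: the statement is the Claim_ definition above) =====
theorem Beauty_Show_Hex_spec : Claim_equal_Beauty_Show_Hex := by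
  intro m _
  unfold Spec_Beauty_Show_Hex Beauty_Show_Hex Beauty_Show_Hex_alt
  set n : Int := (m.toList.length : Int) with hn
  have hn0 : 0 ≤ n := by simp [hn]
  have hdiv : PySem.Int.floordiv (-n) 8 = (-n) / 8 :=
    PySem.Int.floordiv_eq_ediv_of_pos (by norm_num)
  have hmod : PySem.Int.mod (-n) 8 = (-n) % 8 :=
    PySem.Int.mod_eq_emod_of_pos (by norm_num)
  have hpadeq : (8 * -(PySem.Int.floordiv (-n) 8) - n).toNat = (PySem.Int.mod (-n) 8).toNat := by
    rw [hdiv, hmod]; omega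
  simp only [hpadeq]
  set pad : List Char := List.replicate (PySem.Int.mod (-n) 8).toNat '0' ++ m.toList with hpad
  have hlenNat : pad.length = (PySem.Int.mod (-n) 8).toNat + m.toList.length := by
    simp [hpad]
  obtain ⟨j, hj⟩ : ∃ j : Nat, pad.length = 8 * j := by
    have hlenInt : (pad.length : Int) = PySem.Int.mod (-n) 8 + n := by
      rw [hlenNat]; push_cast; rw [hmod, hn]; omega
    have hdvd : (8 : Int) ∣ (pad.length : Int) := by rw [hlenInt, hmod]; omega
    obtain ⟨c, hc⟩ := hdvd
    exact ⟨c.toNat, by omega⟩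
  rw [pvALoop_chunks j pad [] hj, hj]
  have hc : ((8 * j : Nat) : Int) = (8 : Int) * j := by push_cast; ring
  rw [hc, pvRange_eight j, pvFlat_chunks j pad]
  simp
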